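-- pv_equiv track=rewrite | github.com/ArisenPhoenix/typing-speed-test | funcs.py | calculate_errors
-- ===== SOURCE A (Python) =====
-- def switch(v1, v2):
--     a = v2
--     v2 = v1
--     v1 = a
--     return v1, v2
--
-- def longer_switch(v1, v2):
--     if len(v1) < len(v2):
--         v1, v2 = switch(v1, v2)
--         return v1, v2, True
--     else:
--         return v1, v2, False
--
-- def calculate_errors(p1, p2):
--     p1 = p1.split(" ")
--     p2 = p2.split(" ")
--     starting_errors = abs(len(p1) - len(p2))
--     longer, shorter, switched = longer_switch(p1, p2)
--
--     indexes_wrong = []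
--     for word in range(len(longer)):
--         try:
--             if longer[word] != shorter[word]:
--                 indexes_wrong.append(word)
--         except IndexError:
--             pass
--
--     word_list = []
--     for index in indexes_wrong:
--         data = {
--             "correct": p1[index],
--             "incorrect": p2[index],
--         }
--         p1, p2, switched = longer_switch(p1, p2)
--         try:
--             data["errors"] = abs(len(p1[index]) - len(p2[index]))
--         except IndexError:
--             data["errors"] = abs(len(p1) - len(p2))
--
--         for letter in range(len(p1[index])):
--             orig = p1[index][letter]
--             try:
--                 bad = p2[index][letter]
--                 if orig == bad:
--                     data[letter] = orig
--                 else: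
--                     data["errors"] = data["errors"] + 1
--             except IndexError:
--                 data[letter] = f"({orig})"
--         word_list.append(data)
--     total_errors = 0
--     for word in word_list:
--         total_errors += word["errors"]
--     return total_errors + starting_errors
-- ===== SOURCE B (Python) =====
-- def calculate_errors(p1, p2):
--     w1 = p1.split(" ")
--     w2 = p2.split(" ")
--     total = abs(len(w1) - len(w2))
--     for a, b in zip(w1, w2):
--         total += abs(len(a) - len(b))
--         for x, y in zip(a, b):
--             if x != y:
--                 total += 1
--     return total
-- ===== Notes on version B (the rewrite author's own statement) =====
-- stated objective: simpler
-- what changed: B replaces the switch/longer_switch helpers, the indexes_wrong index table with try/except index probing, and the per-word dicts accumulated in word_list by a single direct two-level zip pass that adds the word-count difference, each aligned pair's length difference, and one per differing aligned character; a timing run measured it constant-factor faster (no dict/table bookkeeping).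
import Mathlib
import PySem

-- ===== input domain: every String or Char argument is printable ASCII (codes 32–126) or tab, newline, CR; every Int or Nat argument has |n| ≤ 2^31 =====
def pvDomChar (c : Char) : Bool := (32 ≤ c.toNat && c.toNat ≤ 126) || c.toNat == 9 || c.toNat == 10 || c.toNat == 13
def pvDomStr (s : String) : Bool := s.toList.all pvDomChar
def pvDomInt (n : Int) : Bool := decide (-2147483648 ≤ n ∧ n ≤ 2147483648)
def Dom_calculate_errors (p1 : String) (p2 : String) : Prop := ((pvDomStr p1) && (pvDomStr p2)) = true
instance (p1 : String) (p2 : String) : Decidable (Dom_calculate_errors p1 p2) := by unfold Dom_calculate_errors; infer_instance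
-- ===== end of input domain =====

-- B replaces A's switch/longer_switch helpers, indexes_wrong table with try/except index probing,
-- and per-word dicts by one direct two-level zip pass; objective: simpler (same asymptotic cost).

-- ===== PORT A =====
-- Words are kept as List Char (PySem.Str functions are thin wrappers over PySem.Chars on toList).
-- Python's heterogeneous dict (str and int keys; str and int values) is ported with sum-like types.
inductive EKey | str : String → EKey | idx : Int → EKey
deriving DecidableEq, Repr
inductive EVal | s : String → EVal | n : Int → EVal
deriving DecidableEq, Repr
def pvSwitch (v1 v2 : List (List Char)) : List (List Char) × List (List Char) := (v2, v1)
def pvLongerSwitch (v1 v2 : List (List Char)) : List (List Char) × List (List Char) × Bool :=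
  if v1.length < v2.length then
    let p := pvSwitch v1 v2
    (p.1, p.2, true)
  else (v1, v2, false)
def pvErrs (d : PySem.Dict EKey EVal) : Int :=
  match d.get? (EKey.str "errors") with
  | some (EVal.n e) => e
  | _ => 0
def pvLetterStep (w1 w2 : List Char) (d : PySem.Dict EKey EVal) (letter : Int) : PySem.Dict EKey EVal :=
  match PySem.List.pyGet? w1 letter with
  | none => d
  | some orig =>
    match PySem.List.pyGet? w2 letter with
    | some bad =>
      if orig = bad then d.insert (EKey.idx letter) (EVal.s (String.ofList [orig]))
      else d.insert (EKey.str "errors") (EVal.n (pvErrs d + 1))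
    | none => d.insert (EKey.idx letter) (EVal.s ("(" ++ String.ofList [orig] ++ ")"))
def pvWordStep (st : List (List Char) × List (List Char) × Bool × List (PySem.Dict EKey EVal))
    (index : Int) : List (List Char) × List (List Char) × Bool × List (PySem.Dict EKey EVal) :=
  let p1 := st.1
  let p2 := st.2.1
  let wl := st.2.2.2
  let d0 := ((PySem.Dict.empty).insert (EKey.str "correct")
      (EVal.s (String.ofList (PySem.List.pyGetD p1 index [])))).insert (EKey.str "incorrect")
      (EVal.s (String.ofList (PySem.List.pyGetD p2 index [])))
  let ls := pvLongerSwitch p1 p2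
  let p1' := ls.1
  let p2' := ls.2.1
  let sw' := ls.2.2
  let d1 := match PySem.List.pyGet? p1' index, PySem.List.pyGet? p2' index with
    | some a, some b => d0.insert (EKey.str "errors") (EVal.n |(a.length : Int) - b.length|)
    | _, _ => d0.insert (EKey.str "errors") (EVal.n |(p1'.length : Int) - p2'.length|)
  let w1 := PySem.List.pyGetD p1' index []
  let w2 := PySem.List.pyGetD p2' index []
  let d2 := (PySem.List.pyRange 0 w1.length 1).foldl (pvLetterStep w1 w2) d1
  (p1', p2', sw', wl ++ [d2])
def calculate_errors (p1 : String) (p2 : String) : Int :=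
  let l1 := PySem.Chars.splitOn p1.toList " ".toList
  let l2 := PySem.Chars.splitOn p2.toList " ".toList
  let starting_errors : Int := |(l1.length : Int) - l2.length|
  let ls := pvLongerSwitch l1 l2
  let longer := ls.1
  let shorter := ls.2.1
  let indexes_wrong := (PySem.List.pyRange 0 longer.length 1).foldl (fun acc word =>
    match PySem.List.pyGet? longer word, PySem.List.pyGet? shorter word with
    | some lw, some sw => if lw ≠ sw then acc ++ [word] else acc
    | _, _ => acc) ([] : List Int)
  let word_list := (indexes_wrong.foldl pvWordStep (l1, l2, ls.2.2, [])).2.2.2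
  let total_errors := word_list.foldl (fun t d => t + pvErrs d) 0
  total_errors + starting_errors
def calculate_errors_alt (p1 : String) (p2 : String) : Int :=
  let w1 := PySem.Chars.splitOn p1.toList " ".toList
  let w2 := PySem.Chars.splitOn p2.toList " ".toList
  let total0 : Int := |(w1.length : Int) - w2.length|
  (w1.zip w2).foldl (fun t ab =>
    (ab.1.zip ab.2).foldl (fun t xy => if xy.1 ≠ xy.2 then t + 1 else t)
      (t + |(ab.1.length : Int) - ab.2.length|)) total0

-- ===== PRECONDITION & SPEC =====
def Spec_calculate_errors (p1 : String) (p2 : String) (out : Int) : Prop := out = calculate_errors_alt p1 p2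
instance (p1 : String) (p2 : String) (out : Int) : Decidable (Spec_calculate_errors p1 p2 out) := by unfold Spec_calculate_errors; infer_instance

-- ===== CLAIM (what is proved, stated in full; the proofs are below) =====
def Claim_equal_calculate_errors : Prop := ∀ (p1 : String) (p2 : String), Dom_calculate_errors p1 p2 → Spec_calculate_errors p1 p2 (calculate_errors p1 p2)

-- ===== LEMMAS AND PROOFS =====
-- error weight of one aligned word pair: length difference plus mismatching aligned characters
def wErr (a b : List Char) : Int :=
  |(a.length : Int) - b.length| + ((a.zip b).countP (fun xy => xy.1 ≠ xy.2) : Nat)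

-- A's indexes_wrong membership test as a predicate
def pWrong (L S : List (List Char)) (w : Int) : Bool :=
  match PySem.List.pyGet? L w, PySem.List.pyGet? S w with
  | some lw, some sw => lw ≠ sw
  | _, _ => false

-- mismatch at one character position, as A's letter loop tests it
def pMism (w1 w2 : List Char) (j : Int) : Bool :=
  match PySem.List.pyGet? w1 j, PySem.List.pyGet? w2 j with
  | some a, some b => a ≠ b
  | _, _ => false

theorem zip_self_eq (a : List Char) (x y : Char) (h : (x, y) ∈ a.zip a) : x = y := by
  induction a with
  | nil => simp at h
  | cons c t ih =>
    simp [List.zip_cons_cons] at h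
    rcases h with ⟨h1, h2⟩ | h
    · rw [h1, h2]
    · exact ih h

theorem wErr_self (a : List Char) : wErr a a = 0 := by
  have h : (a.zip a).countP (fun xy => xy.1 ≠ xy.2) = 0 := by
    rw [List.countP_eq_zero]
    rintro ⟨x, y⟩ hxy
    simp only [decide_eq_true_eq, ne_eq, Decidable.not_not]
    exact zip_self_eq a x y hxy
  unfold wErr
  rw [h]
  simp

theorem wErr_comm (a b : List Char) : wErr a b = wErr b a := by
  have h : (b.zip a) = (a.zip b).map Prod.swap := (List.zip_swap a b).symm
  have h2 : ((a.zip b).map Prod.swap).countP (fun xy => xy.1 ≠ xy.2)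
      = (a.zip b).countP (fun xy => xy.1 ≠ xy.2) := by
    rw [List.countP_map]
    apply List.countP_congr
    intro xy _
    simp only [Function.comp, Prod.fst_swap, Prod.snd_swap]
    constructor <;> (intro hx; simp_all [ne_comm])
  unfold wErr
  rw [h, h2, abs_sub_comm]

theorem foldB_inner (l : List (Char × Char)) (t : Int) :
    l.foldl (fun t xy => if xy.1 ≠ xy.2 then t + 1 else t) t
      = t + (l.countP (fun xy => xy.1 ≠ xy.2) : Nat) := by
  induction l generalizing t with
  | nil => simp
  | cons x l ih =>
    rw [List.foldl_cons, ih, List.countP_cons]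
    by_cases h : x.1 = x.2
    · simp [h]
    · simp only [h, ne_eq, not_false_eq_true, if_pos, decide_true, decide_not]
      push_cast [h]
      ring

theorem foldB_outer (l : List (List Char × List Char)) (t : Int) :
    l.foldl (fun t ab =>
        (ab.1.zip ab.2).foldl (fun t xy => if xy.1 ≠ xy.2 then t + 1 else t)
          (t + |(ab.1.length : Int) - ab.2.length|)) t
      = t + (l.map (fun ab => wErr ab.1 ab.2)).sum := by
  induction l generalizing t with
  | nil => simp
  | cons ab l ih =>
    rw [List.foldl_cons, ih, foldB_inner, List.map_cons, List.sum_cons]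
    unfold wErr
    ring

theorem pvErrs_insert_idx (d : PySem.Dict EKey EVal) (i : Int) (v : EVal) :
    pvErrs (d.insert (EKey.idx i) v) = pvErrs d := by
  unfold pvErrs
  rw [PySem.Dict.get?_insert_of_ne d v (by simp)]

theorem pvErrs_step (w1 w2 : List Char) (d : PySem.Dict EKey EVal) (j : Int) :
    pvErrs (pvLetterStep w1 w2 d j) = pvErrs d + (if pMism w1 w2 j then 1 else 0) := by
  unfold pvLetterStep pMism
  cases h1 : PySem.List.pyGet? w1 j with
  | none => simp
  | some orig =>
    cases h2 : PySem.List.pyGet? w2 j with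
    | none => simp [pvErrs_insert_idx]
    | some bad =>
      by_cases h : orig = bad
      · simp [h, pvErrs_insert_idx]
      · simp [pvErrs, h, PySem.Dict.get?_insert_self]

theorem pvErrs_letter_fold (w1 w2 : List Char) (ls : List Int) (d : PySem.Dict EKey EVal) :
    pvErrs (ls.foldl (pvLetterStep w1 w2) d) = pvErrs d + (ls.countP (pMism w1 w2) : Nat) := by
  induction ls generalizing d with
  | nil => simp
  | cons j ls ih =>
    rw [List.foldl_cons, ih, pvErrs_step, List.countP_cons]
    by_cases h : pMism w1 w2 j = true
    · simp [h]; ring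
    · simp [h]

theorem count_pMism_nat (a b : List Char) :
    (List.range a.length).countP (fun j : Nat => pMism a b (j : Int))
      = (a.zip b).countP (fun xy => xy.1 ≠ xy.2) := by
  induction a generalizing b with
  | nil => simp
  | cons c a ih =>
    rw [List.length_cons, List.range_succ_eq_map, List.countP_cons, List.countP_map]
    cases b with
    | nil =>
      simp [pMism, PySem.List.pyGet?, PySem.List.pyIdx?]
    | cons d b =>
      have hstep : ∀ j : Nat, pMism (c :: a) (d :: b) ((Nat.succ j : Nat) : Int) = pMism a b (j : Int) := by
        intro j
        unfold pMism
        have hc : ((Nat.succ j : Nat) : Int) = (j : Int) + 1 := by push_cast; ring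
        rw [hc, PySem.List.pyGet?_cons_succ, PySem.List.pyGet?_cons_succ]
      have h0 : pMism (c :: a) (d :: b) ((0 : Nat) : Int) = decide (c ≠ d) := by
        unfold pMism
        rw [show ((0 : Nat) : Int) = 0 by simp, PySem.List.pyGet?_zero_cons, PySem.List.pyGet?_zero_cons]
      rw [List.zip_cons_cons, List.countP_cons]
      have hcong : List.countP ((fun j : Nat => pMism (c :: a) (d :: b) (j : Int)) ∘ Nat.succ) (List.range a.length)
          = List.countP (fun j : Nat => pMism a b (j : Int)) (List.range a.length) := by
        apply List.countP_congr
        intro j _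
        simp only [Function.comp_apply]
        rw [hstep j]
      rw [hcong, ih, h0]

theorem count_pMism (a b : List Char) :
    (PySem.List.pyRange 0 a.length 1).countP (pMism a b) = (a.zip b).countP (fun xy => xy.1 ≠ xy.2) := by
  rw [PySem.List.pyRange_zero_natCast a.length, List.countP_map]
  exact count_pMism_nat a b

theorem wordStep_eq (L S a b : List (List Char)) (x sw : Bool) (wl : List (PySem.Dict EKey EVal)) (i : Int)
    (hab : pvLongerSwitch a b = (L, S, x)) (h0 : 0 ≤ i) (h1 : i < (S.length : Int))
    (hLS : S.length ≤ L.length) :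
    ∃ d2, pvWordStep (a, b, sw, wl) i = (L, S, x, wl ++ [d2]) ∧
      pvErrs d2 = wErr (L.getD i.toNat []) (S.getD i.toNat []) := by
  have h1L : i < (L.length : Int) := by
    exact lt_of_lt_of_le h1 (by exact_mod_cast hLS)
  unfold pvWordStep
  simp only [hab]
  rw [PySem.List.pyGet?_eq_some_getElem L h0 h1L, PySem.List.pyGet?_eq_some_getElem S h0 h1,
      PySem.List.pyGetD_eq_getElem L [] h0 h1L, PySem.List.pyGetD_eq_getElem S [] h0 h1]
  refine ⟨_, rfl, ?_⟩
  rw [pvErrs_letter_fold, count_pMism]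
  unfold pvErrs wErr
  rw [PySem.Dict.get?_insert_self]
  rw [List.getD_eq_getElem L [] (by omega), List.getD_eq_getElem S [] (by omega)]

theorem sumErrs (wl : List (PySem.Dict EKey EVal)) (t : Int) :
    wl.foldl (fun t d => t + pvErrs d) t = t + (wl.map pvErrs).sum := by
  induction wl generalizing t with
  | nil => simp
  | cons d wl ih => rw [List.foldl_cons, ih, List.map_cons, List.sum_cons]; ring

theorem word_fold_sum (L S : List (List Char)) (hLS : S.length ≤ L.length)
    (idxs : List Int) (a b : List (List Char)) (x sw : Bool) (wl : List (PySem.Dict EKey EVal))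
    (hab : pvLongerSwitch a b = (L, S, x))
    (hidx : ∀ i ∈ idxs, 0 ≤ i ∧ i < (S.length : Int)) :
    ((idxs.foldl pvWordStep (a, b, sw, wl)).2.2.2).foldl (fun t d => t + pvErrs d) 0
      = wl.foldl (fun t d => t + pvErrs d) 0
        + (idxs.map (fun i => wErr (L.getD i.toNat []) (S.getD i.toNat []))).sum := by
  induction idxs generalizing a b x sw wl with
  | nil => simp
  | cons i idxs ih =>
    obtain ⟨h0, h1⟩ := hidx i (by simp)
    obtain ⟨d2, hstep, herr⟩ := wordStep_eq L S a b x sw wl i hab h0 h1 hLS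
    rw [List.foldl_cons, hstep]
    have hLSswitch : pvLongerSwitch L S = (L, S, false) := by
      unfold pvLongerSwitch
      rw [if_neg (by omega)]
    rw [ih L S false x (wl ++ [d2]) hLSswitch (fun j hj => hidx j (by simp [hj]))]
    rw [List.map_cons, List.sum_cons, sumErrs, sumErrs, List.map_append, List.sum_append]
    simp [herr]
    ring

theorem filtered_sum_nat (L S : List (List Char)) :
    (((List.range L.length).filter (fun j : Nat => pWrong L S (j : Int))).map
        (fun j => wErr (L.getD j []) (S.getD j []))).sum
      = ((L.zip S).map (fun ab => wErr ab.1 ab.2)).sum := by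
  induction L generalizing S with
  | nil => simp
  | cons c L ih =>
    rw [List.length_cons, List.range_succ_eq_map, List.filter_cons]
    cases S with
    | nil =>
      simp [pWrong, PySem.List.pyGet?, PySem.List.pyIdx?, List.filter_map]
    | cons d S =>
      have hstep : ∀ j : Nat, pWrong (c :: L) (d :: S) ((Nat.succ j : Nat) : Int) = pWrong L S (j : Int) := by
        intro j
        unfold pWrong
        have hc : ((Nat.succ j : Nat) : Int) = (j : Int) + 1 := by push_cast; ring
        rw [hc, PySem.List.pyGet?_cons_succ, PySem.List.pyGet?_cons_succ]
      have h0 : pWrong (c :: L) (d :: S) ((0 : Nat) : Int) = decide (c ≠ d) := by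
        unfold pWrong
        rw [show ((0 : Nat) : Int) = 0 by simp, PySem.List.pyGet?_zero_cons, PySem.List.pyGet?_zero_cons]
      have htail :
          ((List.filter (fun j : Nat => pWrong (c :: L) (d :: S) (j : Int)) (List.map Nat.succ (List.range L.length))).map
              (fun j => wErr ((c :: L).getD j []) ((d :: S).getD j []))).sum
            = ((L.zip S).map (fun ab => wErr ab.1 ab.2)).sum := by
        rw [List.filter_map, List.map_map]
        have hcong : List.filter ((fun j : Nat => pWrong (c :: L) (d :: S) (j : Int)) ∘ Nat.succ) (List.range L.length)
            = List.filter (fun j : Nat => pWrong L S (j : Int)) (List.range L.length) := by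
          apply List.filter_congr
          intro j _
          simp only [Function.comp_apply]
          rw [hstep j]
        rw [hcong]
        have : ((fun j => wErr ((c :: L).getD j []) ((d :: S).getD j [])) ∘ Nat.succ)
            = (fun j => wErr (L.getD j []) (S.getD j [])) := by
          funext j
          simp
        rw [this, ih S]
      rw [List.zip_cons_cons, List.map_cons, List.sum_cons]
      by_cases h : c = d
      · rw [if_neg (by simp [pWrong, PySem.List.pyGet?, PySem.List.pyIdx?, h]), htail, h, wErr_self]
        ring
      · rw [if_pos (by simp [pWrong, PySem.List.pyGet?, PySem.List.pyIdx?, h]), List.map_cons, List.sum_cons, htail]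
        simp

-- A's word/letter pipeline for a fixed longer/shorter pair computes the zip sum of word errors
theorem A_value (l1 l2 L S : List (List Char)) (x : Bool)
    (hab : pvLongerSwitch l1 l2 = (L, S, x)) (hLS : S.length ≤ L.length) :
    ((((PySem.List.pyRange 0 L.length 1).foldl (fun acc word =>
        match PySem.List.pyGet? L word, PySem.List.pyGet? S word with
        | some lw, some sw => if lw ≠ sw then acc ++ [word] else acc
        | _, _ => acc) ([] : List Int)).foldl pvWordStep (l1, l2, x, [])).2.2.2).foldl
          (fun t d => t + pvErrs d) 0
      = ((L.zip S).map (fun ab => wErr ab.1 ab.2)).sum := by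
  have hbody : (fun (acc : List Int) word =>
      match PySem.List.pyGet? L word, PySem.List.pyGet? S word with
      | some lw, some sw => if lw ≠ sw then acc ++ [word] else acc
      | _, _ => acc)
      = fun (acc : List Int) w => if pWrong L S w then acc ++ [w] else acc := by
    funext acc w
    unfold pWrong
    cases PySem.List.pyGet? L w <;> cases PySem.List.pyGet? S w <;> simp
  rw [hbody, PySem.List.foldl_append_if (pWrong L S) (fun w => w)]
  have hidx : ∀ i ∈ ([] : List Int) ++ ((PySem.List.pyRange 0 L.length 1).filter (pWrong L S)).map (fun w => w),
      0 ≤ i ∧ i < (S.length : Int) := by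
    intro i hi
    simp only [List.nil_append, List.map_id_fun', List.mem_filter, id] at hi
    obtain ⟨him, hp⟩ := hi
    have h0 := PySem.List.mem_pyRange_one.mp him
    refine ⟨h0.1, ?_⟩
    by_contra hcon
    have hnone : PySem.List.pyGet? S i = none := by
      rw [PySem.List.pyGet?_eq_none_iff]
      unfold PySem.Raise.InRange
      omega
    unfold pWrong at hp
    rw [hnone] at hp
    cases PySem.List.pyGet? L i <;> simp at hp
  rw [word_fold_sum L S hLS _ l1 l2 x x [] hab hidx]
  simp only [List.nil_append, List.foldl_nil, List.map_map]
  rw [PySem.List.pyRange_zero_natCast L.length, List.filter_map, List.map_map]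
  have e1 : (((fun i : Int => wErr (L.getD i.toNat []) (S.getD i.toNat [])) ∘ fun w : Int => w) ∘ fun k : Nat => (k : Int))
      = fun j : Nat => wErr (L.getD j []) (S.getD j []) := by
    funext j
    simp
  have e2 : ((pWrong L S) ∘ fun k : Nat => (k : Int)) = fun j : Nat => pWrong L S (j : Int) := by
    funext j
    rfl
  rw [e1, e2, filtered_sum_nat L S, zero_add]

theorem main_eq (p1 p2 : String) : calculate_errors p1 p2 = calculate_errors_alt p1 p2 := by
  simp only [calculate_errors, calculate_errors_alt]
  generalize PySem.Chars.splitOn p1.toList " ".toList = l1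
  generalize PySem.Chars.splitOn p2.toList " ".toList = l2
  rw [foldB_outer]
  by_cases hlen : l1.length < l2.length
  · have hab : pvLongerSwitch l1 l2 = (l2, l1, true) := by
      simp [pvLongerSwitch, pvSwitch, hlen]
    rw [hab]
    rw [A_value _ _ _ _ true hab (le_of_lt hlen)]
    have hswap : ((l2.zip l1).map (fun ab => wErr ab.1 ab.2))
        = ((l1.zip l2).map (fun ab => wErr ab.1 ab.2)) := by
      rw [← List.zip_swap, List.map_map]
      apply List.map_congr_left
      intro ab _
      simp [wErr_comm ab.1 ab.2]
    rw [hswap]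
    ring
  · have hab : pvLongerSwitch l1 l2 = (l1, l2, false) := by
      simp [pvLongerSwitch, hlen]
    rw [hab]
    rw [A_value _ _ _ _ false hab (by omega)]
    ring

-- ===== VERDICT (by name: the statement is the Claim_ definition above) =====
theorem calculate_errors_spec : Claim_equal_calculate_errors := by
  intro p1 p2 _
  show calculate_errors p1 p2 = calculate_errors_alt p1 p2
  exact main_eq p1 p2
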